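-- pv_equiv track=rewrite | github.com/cskitty/bUSACO | ACSL/lex_strings.py | rearrangedString
-- ===== SOURCE A (Python) =====
-- def rearrangedString(olds):
--     s = ""
--     for x in olds:
--         if x.isalpha() or x.isdigit():
--             s += x
--
--     s = sorted(s)
--     i = 0
--     d = {}
--     while i < len(s):
--         try:
--             d[s[i]] += 1
--         except:
--             d[s[i]] = 1
--         i += 1
--     reversedD = {}
--     for k in d:
--         try:
--             reversedD[d[k]] += k
--         except:
--             reversedD[d[k]] = str(k)
--     r = False
--     output = ''
--     for k in sorted(reversedD.keys(), reverse=True):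
--         output += str(k)
--         for item in sorted(reversedD[k], reverse=r):
--             output += item
--         output += ","
--         if r:
--             r = False
--         else:
--             r = True
--
--     return output[:-1]
-- ===== SOURCE B (Python) =====
-- def rearrangedString(olds):
--     counts = {}
--     for x in olds:
--         if x.isalpha() or x.isdigit():
--             counts[x] = counts.get(x, 0) + 1
--     freqs = sorted(set(counts.values()), reverse=True)
--     groups = []
--     for i, f in enumerate(freqs):
--         chars = sorted((c for c in counts if counts[c] == f), reverse=(i % 2 == 1))
--         groups.append(str(f) + ''.join(chars))
--     return ','.join(groups)
-- ===== Notes on version B (the rewrite author's own statement) =====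
-- stated objective: simpler
-- what changed: B drops A's sort-the-whole-string pass, the index-driven while-loop counter and the inverted frequency-to-chars dict: it counts in one unsorted pass, takes the distinct counts sorted descending, and for each frequency re-scans the distinct characters selecting those with that count, alternating the sort direction by index parity; the groups are comma-joined directly instead of appending a trailing separator and slicing it off.
import Mathlib
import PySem

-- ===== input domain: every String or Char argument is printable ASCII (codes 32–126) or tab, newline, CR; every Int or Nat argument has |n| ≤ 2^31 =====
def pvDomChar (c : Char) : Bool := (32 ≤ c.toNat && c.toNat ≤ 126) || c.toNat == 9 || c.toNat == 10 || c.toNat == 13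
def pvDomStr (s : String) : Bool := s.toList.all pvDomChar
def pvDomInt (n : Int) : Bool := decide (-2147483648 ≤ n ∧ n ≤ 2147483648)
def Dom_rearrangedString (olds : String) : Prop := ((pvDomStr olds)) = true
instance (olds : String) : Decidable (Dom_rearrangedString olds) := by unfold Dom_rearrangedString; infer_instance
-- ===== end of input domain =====

-- B replaces A's sort-then-count-then-invert pipeline by one counting pass plus a
-- per-frequency rescan of the distinct characters (objective: simpler).

-- ===== PORT A =====
-- body of A's output loop: output += str(k); for item in sorted(reversedD[k], reverse=r): output += item; output += ","; flip r
def pvAStep (rd : PySem.Dict Int (List Char)) (st : Bool × List Char) (k : Int) : Bool × List Char :=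
  let out := st.2 ++ PySem.Int.toChars k
  let out := (PySem.List.sorted (rd.getD k []) (fun x => x) st.1).foldl
    (fun o item => o ++ [item]) out
  (if st.1 then false else true, out ++ [','])

def rearrangedString (olds : String) : String :=
  -- s = ''; for x in olds: if x.isalpha() or x.isdigit(): s += x
  let s0 : List Char :=
    olds.toList.foldl
      (fun s x => if PySem.Chars.isalpha x || PySem.Chars.isdigit x then s ++ [x] else s) []
  -- s = sorted(s)
  let s : List Char := PySem.List.sorted s0 (fun x => x) false
  -- while i < len(s): try d[s[i]] += 1 except d[s[i]] = 1; i += 1   (a serial pass over s's elements)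
  let d : PySem.Dict Char Int :=
    s.foldl (fun d x => d.insert x (d.getD x 0 + 1)) PySem.Dict.empty
  -- for k in d: try reversedD[d[k]] += k except reversedD[d[k]] = str(k)
  -- (d[k] never raises here since k ranges over d's keys, so getD is exact)
  let rd : PySem.Dict Int (List Char) :=
    d.keys.foldl
      (fun rd k => rd.insert (d.getD k 0) (rd.getD (d.getD k 0) [] ++ [k])) PySem.Dict.empty
  -- r = False; output = ''; for k in sorted(reversedD.keys(), reverse=True): …
  let st : Bool × List Char :=
    (PySem.List.sorted rd.keys (fun x => x) true).foldl (pvAStep rd) (false, [])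
  -- return output[:-1]
  String.ofList (PySem.List.slice st.2 none (some (-1)))

-- ===== PORT B =====
-- body of B's loop: groups.append(str(f) + ''.join(sorted((c for c in counts if counts[c] == f), reverse=(i % 2 == 1))))
def pvBStep (counts : PySem.Dict Char Int) (gs : List (List Char)) (p : Int × Int) : List (List Char) :=
  let chars := PySem.List.sorted (counts.keys.filter (fun c => counts.getD c 0 == p.2))
    (fun x => x) (PySem.Int.mod p.1 2 == 1)
  gs ++ [PySem.Int.toChars p.2 ++ chars]

def rearrangedString_alt (olds : String) : String :=
  -- counts[x] = counts.get(x, 0) + 1 for the kept characters, in one pass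
  let counts : PySem.Dict Char Int :=
    olds.toList.foldl
      (fun d x => if PySem.Chars.isalpha x || PySem.Chars.isdigit x
                  then d.insert x (d.getD x 0 + 1) else d) PySem.Dict.empty
  -- freqs = sorted(set(counts.values()), reverse=True)
  let freqs : List Int := PySem.List.sorted (PySem.Set.ofList counts.values) (fun x => x) true
  -- for i, f in enumerate(freqs): groups.append(…)
  let groups : List (List Char) := (PySem.List.enumerate freqs).foldl (pvBStep counts) []
  -- return ','.join(groups)
  String.ofList (PySem.Chars.join [','] groups)

-- ===== PRECONDITION & SPEC =====
def Spec_rearrangedString (olds : String) (out : String) : Prop := out = rearrangedString_alt olds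
instance (olds : String) (out : String) : Decidable (Spec_rearrangedString olds out) := by unfold Spec_rearrangedString; infer_instance

-- ===== CLAIM (what is proved, stated in full; the proofs are below) =====
def Claim_equal_rearrangedString : Prop := ∀ (olds : String), Dom_rearrangedString olds → Spec_rearrangedString olds (rearrangedString olds)

-- ===== LEMMAS AND PROOFS =====

-- A's inverted dict, built from the sorted distinct characters of S keyed by their count
def pvRd (S : List Char) : PySem.Dict Int (List Char) :=
  (PySem.Set.ofList S).foldl
    (fun rd k => rd.insert ((PySem.Dict.counter S).getD k 0)
      (rd.getD ((PySem.Dict.counter S).getD k 0) [] ++ [k])) PySem.Dict.empty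

-- the canonical group for frequency f with direction r, phrased over the kept-characters list
def pvGroup (L : List Char) (f : Int) (r : Bool) : List Char :=
  PySem.Int.toChars f ++
    PySem.List.sorted ((PySem.Set.ofList L).filter (fun c => ((L.count c : Int) == f)))
      (fun x => x) r

-- A's alternating output chain: one group, a comma, then the rest with the flag flipped
def pvChain (L : List Char) (K : List Int) (b : Bool) : List Char :=
  match K with
  | [] => []
  | f :: K' => pvGroup L f b ++ [','] ++ pvChain L K' (!b)

-- sorted with an arbitrary reverse flag is determined by the multiset when the key is
-- injective and the list has no duplicates
theorem pv_sorted_congr {α κ : Type} [LinearOrder κ] (key : α → κ)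
    (hinj : Function.Injective key) {xs ys : List α} (hnd : ys.Nodup) (h : ys.Perm xs)
    (r : Bool) : PySem.List.sorted xs key r = PySem.List.sorted ys key r := by
  cases r with
  | false => exact (PySem.List.sorted_eq_sorted_of_perm xs ys key hinj h.symm)
  | true =>
    apply PySem.List.sorted_rev_eq_of_perm_of_pairwise_gt
    · exact (PySem.List.sorted_perm ys key true).trans h
    · have hnd' : (PySem.List.sorted ys key true).Nodup :=
        ((PySem.List.sorted_perm ys key true).nodup_iff).mpr hnd
      have hp := PySem.List.sorted_pairwise_rev ys key
      exact (hnd'.and hp).imp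
        (fun {a b} hab => lt_of_le_of_ne hab.2 (fun hk => hab.1 (hinj hk.symm)))

-- the value lists of A's inverted dict: chars whose count is f, in key order
theorem pv_rd_getD (g : Char → Int) :
    ∀ (ks : List Char) (rd0 : PySem.Dict Int (List Char)) (f : Int),
      (ks.foldl (fun rd k => rd.insert (g k) (rd.getD (g k) [] ++ [k])) rd0).getD f []
        = rd0.getD f [] ++ ks.filter (fun k => g k == f) := by
  intro ks
  induction ks with
  | nil => intro rd0 f; simp
  | cons k ks ih =>
    intro rd0 f
    simp only [List.foldl_cons, List.filter_cons, ih, PySem.Dict.getD_insert]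
    by_cases hf : f = g k
    · subst hf; simp
    · have : (g k == f) = false := beq_eq_false_iff_ne.mpr (fun h => hf h.symm)
      simp [hf, this]

-- dropping the final comma of A's comma-terminated groups is ','.join
theorem pv_flatMap_comma_dropLast (gs : List (List Char)) :
    (gs.flatMap (fun g => g ++ [','])).dropLast = PySem.Chars.join [','] gs := by
  induction gs with
  | nil => simp [PySem.Chars.join_nil]
  | cons g gs ih =>
    cases gs with
    | nil => simp [PySem.Chars.join_singleton]
    | cons g' gs' =>
      have hne : ((g' :: gs').flatMap (fun g => g ++ [','])) ≠ [] := by simp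
      rw [List.flatMap_cons, List.dropLast_append_of_ne_nil hne, ih,
        PySem.Chars.join_cons_cons]

-- A's alternating chain equals B's enumerate-indexed groups, comma-terminated
theorem pv_chain_eq_enumerate (L : List Char) :
    ∀ (K : List Int) (s : Int), 0 ≤ s →
      pvChain L K (PySem.Int.mod s 2 == 1)
        = ((PySem.List.enumerate K s).map
            (fun p => pvGroup L p.2 (PySem.Int.mod p.1 2 == 1))).flatMap (fun g => g ++ [',']) := by
  intro K
  induction K with
  | nil => intro s _; simp [pvChain, PySem.List.enumerate_nil]
  | cons f K ih =>
    intro s hs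
    rw [PySem.List.enumerate_cons]
    simp only [List.map_cons, List.flatMap_cons, pvChain]
    rw [← ih (s + 1) (by omega)]
    have h1 : PySem.Int.mod s 2 = s % 2 := PySem.Int.mod_eq_emod_of_pos (by omega)
    have h2 : PySem.Int.mod (s + 1) 2 = (s + 1) % 2 := PySem.Int.mod_eq_emod_of_pos (by omega)
    have : (!(PySem.Int.mod s 2 == 1)) = (PySem.Int.mod (s + 1) 2 == 1) := by
      rw [h1, h2]
      rcases Int.emod_two_eq s with h | h
      · have : (s + 1) % 2 = 1 := by omega
        simp [h, this]
      · have : (s + 1) % 2 = 0 := by omega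
        simp [h, this]
    rw [this]

-- A's output loop produces the chain
theorem pv_loopA (L : List Char) (rd : PySem.Dict Int (List Char))
    (hgrp : ∀ f b, PySem.Int.toChars f ++ PySem.List.sorted (rd.getD f []) (fun x => x) b
      = pvGroup L f b) :
    ∀ (K : List Int) (b : Bool) (out : List Char),
      (K.foldl (pvAStep rd) (b, out)).2 = out ++ pvChain L K b := by
  intro K
  induction K with
  | nil => intro b out; simp [pvChain]
  | cons f K ih =>
    intro b out
    rw [List.foldl_cons]
    have hstep : pvAStep rd (b, out) f
        = ((if b then false else true : Bool), out ++ pvGroup L f b ++ [',']) := by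
      simp only [pvAStep, PySem.List.foldl_append_singleton_eq_self, ← hgrp f b,
        List.append_assoc]
    rw [hstep, ih]
    cases b <;> simp [pvChain]

-- B's output loop collects the groups in order
theorem pv_loopB (counts : PySem.Dict Char Int) (ps : List (Int × Int)) :
    ps.foldl (pvBStep counts) []
      = ps.map (fun p => PySem.Int.toChars p.2 ++
          PySem.List.sorted (counts.keys.filter (fun c => counts.getD c 0 == p.2))
            (fun x => x) (PySem.Int.mod p.1 2 == 1)) := by
  exact (PySem.List.foldl_append_singleton_eq_map
    (fun p : Int × Int => PySem.Int.toChars p.2 ++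
      PySem.List.sorted (counts.keys.filter (fun c => counts.getD c 0 == p.2))
        (fun x => x) (PySem.Int.mod p.1 2 == 1)) ps []).trans (List.nil_append _)

-- the heart of the equivalence, over the already-filtered character list cs
theorem pv_main (cs : List Char) :
    String.ofList (PySem.List.slice
      ((PySem.List.sorted (pvRd (PySem.List.sorted cs (fun x => x) false)).keys
          (fun x => x) true).foldl
        (pvAStep (pvRd (PySem.List.sorted cs (fun x => x) false))) (false, [])).2
      none (some (-1)))
    = String.ofList (PySem.Chars.join [',']
        ((PySem.List.enumerate
            (PySem.List.sorted (PySem.Set.ofList (PySem.Dict.counter cs).values)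
              (fun x => x) true)).foldl (pvBStep (PySem.Dict.counter cs)) [])) := by
  have hSL : (PySem.List.sorted cs (fun x => x) false).Perm cs :=
    PySem.List.sorted_perm cs (fun x => x) false
  set S := PySem.List.sorted cs (fun x => x) false with hSdef
  -- counts agree between the sorted and the unsorted list
  have hdgetD : ∀ c : Char, (PySem.Dict.counter S).getD c 0 = ((cs.count c : Int)) := by
    intro c
    rw [PySem.Dict.getD_counter]
    exact congrArg _ (hSL.count_eq c)
  have hcget : ∀ c : Char, (PySem.Dict.counter cs).getD c 0 = ((cs.count c : Int)) :=
    fun c => PySem.Dict.getD_counter cs c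
  -- A's inverted dict: keys and values
  have hrdget : ∀ f : Int, (pvRd S).getD f []
      = (PySem.Set.ofList S).filter (fun c => ((cs.count c : Int) == f)) := by
    intro f
    have h1 := pv_rd_getD (fun k => (PySem.Dict.counter S).getD k 0)
      (PySem.Set.ofList S) PySem.Dict.empty f
    have h0 : (PySem.Dict.empty : PySem.Dict Int (List Char)).getD f [] = [] := rfl
    rw [pvRd, h1, h0, List.nil_append]
    exact List.filter_congr (fun c _ => by rw [hdgetD c])
  have hrdkeys : (pvRd S).keys
      = PySem.Set.ofList ((PySem.Set.ofList S).map (fun c => ((cs.count c : Int)))) := by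
    rw [pvRd, PySem.Dict.keys_foldl_insert_key, PySem.Dict.keys_empty]
    have hupd : ∀ l : List Int, PySem.Set.update ([] : PySem.Set Int) l = PySem.Set.ofList l :=
      fun l => rfl
    rw [hupd]
    exact congrArg _ (List.map_congr_left (fun c _ => hdgetD c))
  -- B's distinct frequencies are the same distinct ints
  have hvals : (PySem.Dict.counter cs).values
      = (PySem.Set.ofList cs).map (fun c => ((cs.count c : Int))) := by
    rw [PySem.Dict.values_eq_map_keys (PySem.Dict.counter cs)
        (by rw [PySem.Dict.keys_counter]; exact PySem.Set.nodup_ofList cs) 0,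
      PySem.Dict.keys_counter]
    exact List.map_congr_left (fun c _ => hcget c)
  have hK : PySem.List.sorted
        (PySem.Set.ofList ((PySem.Set.ofList S).map (fun c => ((cs.count c : Int)))))
        (fun x => x) true
      = PySem.List.sorted
        (PySem.Set.ofList ((PySem.Set.ofList cs).map (fun c => ((cs.count c : Int)))))
        (fun x => x) true := by
    apply pv_sorted_congr (fun x : Int => x) (fun a b h => h)
      (PySem.Set.nodup_ofList _)
    refine (List.perm_ext_iff_of_nodup (PySem.Set.nodup_ofList _)
      (PySem.Set.nodup_ofList _)).mpr ?_
    intro a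
    simp [PySem.Set.mem_ofList, List.mem_map, hSL.mem_iff]
  -- the per-frequency groups agree
  have hgrp : ∀ (f : Int) (b : Bool),
      PySem.Int.toChars f ++ PySem.List.sorted ((pvRd S).getD f []) (fun x => x) b
        = pvGroup cs f b := by
    intro f b
    rw [hrdget f, pvGroup]
    refine congrArg _ ?_
    apply pv_sorted_congr (fun x : Char => x) (fun a b h => h)
      ((PySem.Set.nodup_ofList cs).filter _)
    refine (List.perm_ext_iff_of_nodup ((PySem.Set.nodup_ofList cs).filter _)
      ((PySem.Set.nodup_ofList S).filter _)).mpr ?_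
    intro a
    simp [List.mem_filter, PySem.Set.mem_ofList, hSL.mem_iff]
  have hBg : ∀ p : Int × Int,
      PySem.Int.toChars p.2 ++
        PySem.List.sorted
          ((PySem.Dict.counter cs).keys.filter
            (fun c => (PySem.Dict.counter cs).getD c 0 == p.2))
          (fun x => x) (PySem.Int.mod p.1 2 == 1)
        = pvGroup cs p.2 (PySem.Int.mod p.1 2 == 1) := by
    intro p
    rw [pvGroup, PySem.Dict.keys_counter]
    exact congrArg _ (congrArg (fun l => PySem.List.sorted l (fun x => x) _)
      (List.filter_congr (fun c _ => by rw [hcget c])))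
  -- assemble both sides
  rw [hrdkeys, hK, pv_loopA cs (pvRd S) hgrp, List.nil_append,
    PySem.List.slice_to_neg_one, hvals]
  have hb : (false : Bool) = (PySem.Int.mod 0 2 == 1) := rfl
  rw [hb, pv_chain_eq_enumerate cs _ 0 (by omega), pv_flatMap_comma_dropLast,
    pv_loopB]
  refine congrArg _ (congrArg _ (List.map_congr_left (fun p _ => (hBg p).symm)))

theorem rearrangedString_eq (olds : String) :
    rearrangedString olds = rearrangedString_alt olds := by
  simp only [rearrangedString, rearrangedString_alt]
  rw [PySem.List.foldl_append_if_eq_filter, List.nil_append,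
    PySem.Dict.foldl_insert_getD_add_one_eq_counter,
    PySem.List.foldl_if_eq_foldl_filter,
    PySem.Dict.foldl_insert_getD_add_one_eq_counter,
    PySem.Dict.keys_counter]
  exact pv_main (olds.toList.filter (fun x => PySem.Chars.isalpha x || PySem.Chars.isdigit x))

-- ===== VERDICT (by name: the statement is the Claim_ definition above) =====
theorem rearrangedString_spec : Claim_equal_rearrangedString := by
  intro olds _
  show rearrangedString olds = rearrangedString_alt olds
  exact rearrangedString_eq olds
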